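-- pv_equiv track=rewrite | github.com/AymenMerrouche/MC-for-Genomic-sequence-analysis | code_ecrit.py | code_inverse
-- ===== SOURCE A (Python) =====
-- def code_inverse(indice, k):
--     reste = indice
--     taille = k-1
--     liste = []
--     div = 0
--     # on récupère chque position dans l’écriture du mot en base 4
--     while taille != -1:
--         div = reste // (4**taille)
--         reste = reste % (4**taille)
--         liste.append(div)
--         taille -= 1
--     return liste
-- ===== SOURCE B (Python) =====
-- def code_inverse(indice, k):
--     # LSB-first: repeated divmod by 4, then one final (unreduced) quotient, reversed.
--     if k == 0:
--         return []
--     q = indice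
--     digits = []
--     for _ in range(k - 1):
--         q, r = divmod(q, 4)
--         digits.append(r)
--     digits.append(q)
--     return digits[::-1]
-- ===== Notes on version B (the rewrite author's own statement) =====
-- stated objective: faster
-- what changed: B extracts the digits least-significant-first with repeated divmod(q,4) and reverses at the end, instead of A's MSB-first loop that recomputes the big-integer power 4**taille and divides by it each iteration; Pre_ excludes k < 0, where A loops forever.
import Mathlib
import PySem

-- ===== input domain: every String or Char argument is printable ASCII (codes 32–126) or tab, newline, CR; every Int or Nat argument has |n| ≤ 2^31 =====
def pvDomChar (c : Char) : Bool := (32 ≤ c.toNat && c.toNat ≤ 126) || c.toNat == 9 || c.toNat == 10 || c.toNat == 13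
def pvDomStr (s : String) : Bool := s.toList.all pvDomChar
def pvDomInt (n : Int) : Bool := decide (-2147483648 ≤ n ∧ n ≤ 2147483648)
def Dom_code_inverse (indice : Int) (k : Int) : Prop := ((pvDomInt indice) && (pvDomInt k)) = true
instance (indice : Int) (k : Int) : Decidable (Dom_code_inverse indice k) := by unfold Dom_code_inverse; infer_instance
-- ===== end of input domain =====

-- B extracts digits least-significant-first via repeated divmod by 4 and reverses, instead of
-- A's MSB-first loop over decreasing powers 4**taille (avoids recomputing big-integer powers; a timing run measured B faster).


-- ===== PORT A =====
-- the while loop: fuel = taille + 1 (loop runs until taille = -1); body appends reste // 4**taille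
def codeInvLoop : Nat → Int → List Int → List Int
  | 0, _, liste => liste
  | n+1, reste, liste =>
      codeInvLoop n (PySem.Int.mod reste (4^n)) (liste ++ [PySem.Int.floordiv reste (4^n)])

def code_inverse (indice : Int) (k : Int) : List Int :=
  codeInvLoop k.toNat indice []

-- ===== PORT B =====
-- the for loop over range(k-1): q, r = divmod(q, 4); digits.append(r)
def altLoop : Nat → Int → List Int → Int × List Int
  | 0, q, digits => (q, digits)
  | n+1, q, digits =>
      altLoop n (PySem.Int.floordiv q 4) (digits ++ [PySem.Int.mod q 4])

def code_inverse_alt (indice : Int) (k : Int) : List Int :=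
  if k = 0 then []
  else
    let p := altLoop (k - 1).toNat indice []
    (p.2 ++ [p.1]).reverse

-- ===== PRECONDITION & SPEC =====
-- Pre_ excludes k < 0, where Python A's while loop never terminates (taille never reaches -1).
def Pre_code_inverse (indice : Int) (k : Int) : Prop := 0 ≤ k
instance (indice : Int) (k : Int) : Decidable (Pre_code_inverse indice k) := by unfold Pre_code_inverse; infer_instance
def pvWitness_code_inverse : Int × Int := (11, 3)
def Spec_code_inverse (indice : Int) (k : Int) (out : List Int) : Prop := out = code_inverse_alt indice k
instance (indice : Int) (k : Int) (out : List Int) : Decidable (Spec_code_inverse indice k out) := by unfold Spec_code_inverse; infer_instance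

-- ===== CLAIM (what is proved, stated in full; the proofs are below) =====
def Claim_equal_code_inverse : Prop := ∀ (indice : Int) (k : Int), Dom_code_inverse indice k → Pre_code_inverse indice k → Spec_code_inverse indice k (code_inverse indice k)

-- ===== LEMMAS AND PROOFS =====

-- floor div/mod with positive divisors, in ediv/emod form
theorem pv_h1 (q b : Int) : q / (4*b) = (q/4)/b := by
  rw [← Int.ediv_ediv_of_nonneg (by norm_num : (0:Int) ≤ 4)]

theorem pv_h2 (q b : Int) : (q % (4*b)) % 4 = q % 4 :=
  Int.emod_emod_of_dvd q ⟨b, rfl⟩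

theorem pv_h3 (q b : Int) : (q % (4*b)) / 4 = (q/4) % b := by
  rw [Int.emod_def q (4*b),
    show q - 4*b*(q/(4*b)) = q + 4*(-(b*(q/(4*b)))) by ring,
    Int.add_mul_ediv_left _ _ (by norm_num : (4:Int) ≠ 0),
    ← Int.ediv_ediv_of_nonneg (by norm_num : (0:Int) ≤ 4), Int.emod_def]
  ring

theorem pv_pow_pos (n : Nat) : (0:Int) < 4^n := by positivity

-- PySem floordiv/mod at the positive divisors used here, in ediv/emod form
theorem pv_fd_pow (q : Int) (n : Nat) : PySem.Int.floordiv q (4^n) = q / 4^n :=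
  PySem.Int.floordiv_eq_ediv_of_pos (pv_pow_pos n)
theorem pv_md_pow (q : Int) (n : Nat) : PySem.Int.mod q (4^n) = q % 4^n :=
  PySem.Int.mod_eq_emod_of_pos (pv_pow_pos n)
theorem pv_fd4 (q : Int) : PySem.Int.floordiv q 4 = q / 4 :=
  PySem.Int.floordiv_eq_ediv_of_pos (by norm_num)
theorem pv_md4 (q : Int) : PySem.Int.mod q 4 = q % 4 :=
  PySem.Int.mod_eq_emod_of_pos (by norm_num)

-- accumulator lemmas
theorem codeInvLoop_acc (n : Nat) (q : Int) (acc : List Int) :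
    codeInvLoop n q acc = acc ++ codeInvLoop n q [] := by
  induction n generalizing q acc with
  | zero => simp [codeInvLoop]
  | succ m ih =>
      rw [codeInvLoop, codeInvLoop,
        ih (PySem.Int.mod q (4^m)) (acc ++ [PySem.Int.floordiv q (4^m)]),
        ih (PySem.Int.mod q (4^m)) ([] ++ [PySem.Int.floordiv q (4^m)])]
      simp

theorem altLoop_acc (n : Nat) (q : Int) (ds : List Int) :
    altLoop n q ds = ((altLoop n q []).1, ds ++ (altLoop n q []).2) := by
  induction n generalizing q ds with
  | zero => simp [altLoop]
  | succ m ih =>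
      rw [altLoop, altLoop,
        ih (PySem.Int.floordiv q 4) (ds ++ [PySem.Int.mod q 4]),
        ih (PySem.Int.floordiv q 4) ([] ++ [PySem.Int.mod q 4])]
      simp

-- peel the LAST digit of A's loop: digits of length n+2 of q = digits of length n+1 of q//4, then q%4
theorem codeInvLoop_last (n : Nat) (q : Int) :
    codeInvLoop (n+2) q [] =
      codeInvLoop (n+1) (PySem.Int.floordiv q 4) [] ++ [PySem.Int.mod q 4] := by
  induction n generalizing q with
  | zero =>
      simp [codeInvLoop, PySem.Int.floordiv, PySem.Int.mod]
  | succ m ih =>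
      rw [show m + 1 + 2 = (m + 2) + 1 from rfl]
      conv_lhs => rw [codeInvLoop, codeInvLoop_acc]
      rw [ih (PySem.Int.mod q (4^(m+2)))]
      conv_rhs => rw [codeInvLoop, codeInvLoop_acc]
      simp only [pv_fd_pow, pv_md_pow, pv_fd4, pv_md4]
      rw [show (4:Int)^(m+2) = 4 * 4^(m+1) by ring,
        pv_h1 q (4^(m+1)), pv_h2 q (4^(m+1)), pv_h3 q (4^(m+1))]
      simp

-- main bridge: A's MSB-first digits = reverse of B's LSB-first digits plus final quotient
theorem codeInvLoop_eq_alt (n : Nat) (q : Int) :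
    codeInvLoop (n+1) q [] = ((altLoop n q []).2 ++ [(altLoop n q []).1]).reverse := by
  induction n generalizing q with
  | zero =>
      simp [codeInvLoop, altLoop]
  | succ m ih =>
      rw [codeInvLoop_last, ih (PySem.Int.floordiv q 4), altLoop,
        altLoop_acc m (PySem.Int.floordiv q 4) ([] ++ [PySem.Int.mod q 4])]
      simp

-- ===== VERDICT (by name: the statement is the Claim_ definition above) =====
theorem code_inverse_spec : Claim_equal_code_inverse := by
  intro indice k _ hpre
  unfold Spec_code_inverse code_inverse code_inverse_alt
  by_cases hk : k = 0
  · subst hk; simp [codeInvLoop]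
  · have h1 : 1 ≤ k := by
      have : 0 ≤ k := hpre
      omega
    have hnat : k.toNat = (k - 1).toNat + 1 := by omega
    rw [hnat, if_neg hk, codeInvLoop_eq_alt]
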